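-- pv_equiv track=rewrite | github.com/brianrez/large-afin-and-nlu | affirmative-interpretation-generation/mention_flag/mf_cal_2.py | find_original
-- ===== SOURCE A (Python) =====
-- from copy import deepcopy
--
-- def find_original(
--     input_ids: list,
--     neg: list,  # 1d
-- ):
--     # returns the beginning index of sublist: neg
--     input_ids_ = deepcopy(input_ids)
--     neg_ = neg.copy()
--     index = 0
--     while len(input_ids_) >= len(neg_):
--         if input_ids_[: len(neg_)] == neg_:
--             return index
--         else:
--             input_ids_.pop(0)
--             index += 1
--     return None
-- ===== SOURCE B (Python) =====
-- def find_original(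
--     input_ids: list,
--     neg: list,  # 1d
-- ):
--     # returns the beginning index of sublist: neg
--     m = len(neg)
--     for i in range(len(input_ids) - m + 1):
--         if input_ids[i:i + m] == neg:
--             return i
--     return None
-- ===== Notes on version B (the rewrite author's own statement) =====
-- stated objective: simpler
-- what changed: Replaced A's destructive loop (deepcopy of the input, repeated pop(0) on a shrinking copy, prefix test) by a non-mutating sliding-window scan over range(n-m+1) comparing the window slice in place.
import Mathlib
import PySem

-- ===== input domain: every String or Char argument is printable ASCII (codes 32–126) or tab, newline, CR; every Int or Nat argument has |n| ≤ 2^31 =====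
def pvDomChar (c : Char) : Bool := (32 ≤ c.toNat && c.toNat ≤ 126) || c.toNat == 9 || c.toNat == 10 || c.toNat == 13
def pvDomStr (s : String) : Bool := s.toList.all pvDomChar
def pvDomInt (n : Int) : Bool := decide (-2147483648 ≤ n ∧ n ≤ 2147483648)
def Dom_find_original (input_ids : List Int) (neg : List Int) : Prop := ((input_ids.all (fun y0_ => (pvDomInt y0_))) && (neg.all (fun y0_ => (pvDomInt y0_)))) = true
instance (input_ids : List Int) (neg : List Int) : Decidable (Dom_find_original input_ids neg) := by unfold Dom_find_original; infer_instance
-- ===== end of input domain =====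

-- B replaces A's deepcopy + repeated pop(0) on a shrinking copy by a non-mutating
-- sliding-window index scan over range(n-m+1) (objective: simpler).

-- ===== PORT A =====
-- while len(input_ids_) >= len(neg_): if input_ids_[:len(neg_)] == neg_: return index
--                                     else: input_ids_.pop(0); index += 1
def find_original_go (l : List Int) (neg : List Int) (index : Int) : Option Int :=
  if neg.length ≤ l.length then
    if PySem.List.slice l none (some (neg.length : Int)) = neg then some index
    else
      match l with
      | [] => none  -- pop(0) on [] would raise; unreachable (then neg = [] and the prefix test matched)
      | _ :: t => find_original_go t neg (index + 1)
  else none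

def find_original (input_ids : List Int) (neg : List Int) : Option Int :=
  find_original_go input_ids neg 0

-- ===== PORT B =====
def find_original_alt (input_ids : List Int) (neg : List Int) : Option Int :=
  (PySem.List.pyRange 0 ((input_ids.length : Int) - (neg.length : Int) + 1) 1).find?
    (fun i => PySem.List.slice input_ids (some i) (some (i + (neg.length : Int))) == neg)

-- ===== PRECONDITION & SPEC =====
def Spec_find_original (input_ids : List Int) (neg : List Int) (out : Option Int) : Prop := out = find_original_alt input_ids neg
instance (input_ids : List Int) (neg : List Int) (out : Option Int) : Decidable (Spec_find_original input_ids neg out) := by unfold Spec_find_original; infer_instance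

-- ===== CLAIM (what is proved, stated in full; the proofs are below) =====
def Claim_equal_find_original : Prop := ∀ (input_ids : List Int) (neg : List Int), Dom_find_original input_ids neg → Spec_find_original input_ids neg (find_original input_ids neg)

-- ===== LEMMAS AND PROOFS =====

-- common reference: first window index (as a Nat) whose window equals neg
def pvNaive (l neg : List Int) : Option Nat :=
  (List.range (l.length - neg.length + 1)).find? (fun i => (l.drop i).take neg.length == neg)

lemma pvTake_ne (l neg : List Int) (h : l.length < neg.length) :
    ((l.take neg.length) == neg) = false := by
  simp only [beq_eq_false_iff_ne, ne_eq]
  intro he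
  have := congrArg List.length he
  simp [List.length_take] at this
  omega

lemma pvGo_unfold (l neg : List Int) (index : Int) :
    find_original_go l neg index =
      if neg.length ≤ l.length then
        if l.take neg.length = neg then some index
        else match l with | [] => none | _ :: t => find_original_go t neg (index + 1)
      else none := by
  rw [find_original_go.eq_def, PySem.List.slice_to_natCast]

lemma pvGo_eq_naive (l neg : List Int) (index : Int) :
    find_original_go l neg index = (pvNaive l neg).map (fun i => index + (i : Int)) := by
  induction l generalizing index with
  | nil =>
    rw [pvGo_unfold]; unfold pvNaive
    by_cases h : neg.length ≤ 0
    · have hn : neg = [] := List.eq_nil_of_length_eq_zero (by omega)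
      subst hn; simp
    · have hn : neg ≠ [] := by intro hc; subst hc; simp at h
      simp [h, List.find?, hn]
  | cons a t ih =>
    rw [pvGo_unfold]; unfold pvNaive
    simp only [List.length_cons]
    rw [List.range_succ_eq_map]
    by_cases hm : neg.length ≤ t.length + 1
    · by_cases ht : (a :: t).take neg.length = neg
      · simp [hm, ht, List.find?]
      · simp only [hm, if_true, ht, if_false]
        rw [ih]
        have hp0 : (((a :: t).drop 0).take neg.length == neg) = false := by
          simp [beq_eq_false_iff_ne, ht]
        simp only [List.find?_cons, hp0]
        rw [List.find?_map]
        simp only [Function.comp_def, Nat.succ_eq_add_one, List.drop_succ_cons]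
        unfold pvNaive
        by_cases hm2 : neg.length ≤ t.length
        · have hk : t.length + 1 - neg.length = t.length - neg.length + 1 := by omega
          rw [hk]
          cases hf : (List.range (t.length - neg.length + 1)).find?
              (fun i => (t.drop i).take neg.length == neg) with
          | none => simp
          | some i => simp; ring
        · -- neg.length = t.length + 1 : both sides are none
          have hk : t.length + 1 - neg.length = 0 := by omega
          rw [hk]
          have hk2 : t.length - neg.length + 1 = 1 := by omega
          rw [hk2]
          simp [List.find?, pvTake_ne t neg (by omega)]
    · -- neg longer than a :: t : both sides none
      have hk : t.length + 1 - neg.length = 0 := by omega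
      rw [hk]
      simp [hm, List.find?, pvTake_ne (a :: t) neg (by simp; omega)]

lemma pvAlt_eq_naive (l neg : List Int) :
    find_original_alt l neg = (pvNaive l neg).map (fun i => (i : Int)) := by
  unfold find_original_alt pvNaive
  rw [PySem.List.pyRange_one, List.find?_map]
  simp only [Function.comp_def, zero_add, PySem.List.slice_natCast_add]
  by_cases hm : neg.length ≤ l.length
  · have hK : ((((l.length : Int) - (neg.length : Int) + 1)) - 0).toNat
        = l.length - neg.length + 1 := by omega
    rw [hK]
    cases (List.range (l.length - neg.length + 1)).find?
        (fun i => (l.drop i).take neg.length == neg) <;> simp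
  · have hK : ((((l.length : Int) - (neg.length : Int) + 1)) - 0).toNat = 0 := by omega
    rw [hK]
    have hk2 : l.length - neg.length + 1 = 1 := by omega
    rw [hk2]
    simp [List.find?, pvTake_ne l neg (by omega)]

-- ===== VERDICT (by name: the statement is the Claim_ definition above) =====
theorem find_original_spec : Claim_equal_find_original := by
  intro l neg _
  unfold Spec_find_original find_original
  rw [pvGo_eq_naive, pvAlt_eq_naive]
  simp
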